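-- pv_equiv track=rewrite | github.com/spencerlofing/CS440TermProject | TPmysolution.py | reachedGoalState
-- ===== SOURCE A (Python) =====
-- import copy
--
-- def validMoves(state):
--     listOfMoves = []
--     for i in range(0, len(state)):
--         if len(state[i]) < 6:
--             listOfMoves.append(i)
--     return listOfMoves
--
-- def reachedGoalState(state):
--     # Fill all slots for computation
--     copystate = copy.deepcopy(state)
--     for slot in copystate:
--         slotlength = len(slot)
--         for i in range(0, 6 - slotlength):
--             slot.insert(0, 'X')
--
--     # Vertical checks
--     for slot in copystate:
--         for i in range(0, 3):
--             if (slot[i] == slot[i + 1]) & (slot[i] == slot[i + 2]) & (slot[i] == slot[i + 3]) & (slot[i] != 'X'):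
--                 return 1
--
--     # Horizontal checks
--     for j in range(0, 4):
--         for i in range(0, len(copystate[0])):
--             if (copystate[j][i] == copystate[j + 1][i]) & (copystate[j][i] == copystate[j + 2][i]) & \
--                     (copystate[j][i] == copystate[j + 3][i]) & (copystate[j][i] != 'X'):
--                 return 1
--
--     # Diaganol up-right
--     for i in range(0, 4):  # row
--         for j in range(3, 6):  # column
--             if (copystate[i][j] == copystate[i + 1][j - 1]) & (copystate[i][j] == copystate[i + 2][j - 2]) & \
--                     (copystate[i][j] == copystate[i + 3][j - 3]) & (copystate[i][j] != 'X'):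
--                 return 1
--
--     # Diaganol up-left
--     for i in range(0, 4):  # row
--         for j in range(0, 3):  # column
--             if (copystate[i][j] == copystate[i + 1][j + 1]) & (copystate[i][j] == copystate[i + 2][j + 2]) & \
--                     (copystate[i][j] == copystate[i + 3][j + 3]) & (copystate[i][j] != 'X'):
--                 return 1
--     # tie
--     if (validMoves(state) == []):
--         return -1
--     # not a goal state
--     return 0
-- ===== SOURCE B (Python) =====
-- def validMoves(state):
--     return [i for i, c in enumerate(state) if len(c) < 6]
--
-- def _run4(cells):
--     # streak counter: True iff the line holds 4+ consecutive equal non-'X' cells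
--     prev, cnt = None, 0
--     for v in cells:
--         cnt = cnt + 1 if v == prev else 1
--         prev = v
--         if cnt >= 4 and v != 'X':
--             return True
--     return False
--
-- def reachedGoalState(state):
--     # pure padded 6-row board (no deepcopy/mutation)
--     board = [(['X'] * (6 - len(c)) + list(c))[:6] for c in state]
--     # verticals: streak-scan every column
--     if any(_run4(col) for col in board):
--         return 1
--     frame = board[:7]
--     # horizontals: streak-scan each of the 6 rows of the 7-column frame
--     if any(_run4([frame[c][r] for c in range(7)]) for r in range(6)):
--         return 1
--     # anti-diagonals of the frame (constant c+r = s)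
--     for s in range(12):
--         if _run4([frame[c][s - c] for c in range(7) if 0 <= s - c < 6]):
--             return 1
--     # main diagonals of the frame (constant c-r; row = c+5-t)
--     for t in range(12):
--         if _run4([frame[c][c + 5 - t] for c in range(7) if 0 <= c + 5 - t < 6]):
--             return 1
--     return -1 if all(len(c) >= 6 for c in state) else 0
-- ===== Notes on version B (the rewrite author's own statement) =====
-- stated objective: alternative
-- what changed: A deep-copies, mutates in a padding loop and scans every 4-cell window with four nested-loop inline comparisons; B builds the padded 6-row board purely, extracts each full line of it (every column, the 6 rows of the 7-column frame, and whole diagonals enumerated by c+r resp. c-r) and runs a single streak counter (run length >= 4 of a non-'X' value) along each line, with the tie test all(len(c) >= 6); Pre_ covers boards with >= 7 columns whose first column has height <= 6, plus boards holding a vertical four-in-a-row (on which A returns 1 before its out-of-range indexing); …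
-- outside the precondition, e.g. on reachedGoalState([[''], [''], [''], ['']]): A returns 1, B raises IndexError
import Mathlib
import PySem

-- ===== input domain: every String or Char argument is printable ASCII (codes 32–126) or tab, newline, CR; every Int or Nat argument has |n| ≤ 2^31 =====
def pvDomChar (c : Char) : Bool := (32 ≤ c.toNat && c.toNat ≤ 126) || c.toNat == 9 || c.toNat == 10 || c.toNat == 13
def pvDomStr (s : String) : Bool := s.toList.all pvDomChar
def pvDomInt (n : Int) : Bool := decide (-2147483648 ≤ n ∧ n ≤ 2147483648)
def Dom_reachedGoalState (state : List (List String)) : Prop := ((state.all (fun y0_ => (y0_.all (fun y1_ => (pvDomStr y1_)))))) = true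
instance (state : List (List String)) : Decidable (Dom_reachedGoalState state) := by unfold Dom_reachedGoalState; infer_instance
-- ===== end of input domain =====

-- B replaces A's deepcopy+mutation and four nested 4-cell-window scans by a pure padded board
-- whose full lines (columns, frame rows, whole diagonals) are each checked by ONE streak counter
-- (run length ≥ 4 of a non-'X' value); objective: alternative algorithm, same cost.

-- ===== PORT A =====
-- padding loop: `for i in range(0, 6 - slotlength): slot.insert(0, 'X')` (Nat subtraction = Python's empty range when negative)
def pvPadA (slot : List String) : List String :=
  (List.range (6 - slot.length)).foldl (fun s _ => "X" :: s) slot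

def pvBoardA (state : List (List String)) : List (List String) :=
  state.map pvPadA

-- cell indexing; `.getD` with a default is exact on Pre_, where every index used is in range
def pvCell (b : List (List String)) (c i : Nat) : String := (b.getD c []).getD i ""

def validMovesA (state : List (List String)) : List Int :=
  (List.range state.length).foldl
    (fun acc i => if (state.getD i []).length < 6 then acc ++ [(i : Int)] else acc) []

def reachedGoalState (state : List (List String)) : Int :=
  -- vertical checks
  if (pvBoardA state).any (fun slot => (List.range 3).any (fun i =>
      (slot.getD i "" == slot.getD (i+1) "") && (slot.getD i "" == slot.getD (i+2) "")
        && (slot.getD i "" == slot.getD (i+3) "") && (slot.getD i "" != "X"))) then 1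
  -- horizontal checks
  else if (List.range 4).any (fun j => (List.range ((pvBoardA state).getD 0 []).length).any (fun i =>
      (pvCell (pvBoardA state) j i == pvCell (pvBoardA state) (j+1) i) && (pvCell (pvBoardA state) j i == pvCell (pvBoardA state) (j+2) i)
        && (pvCell (pvBoardA state) j i == pvCell (pvBoardA state) (j+3) i) && (pvCell (pvBoardA state) j i != "X"))) then 1
  -- diagonal up-right; [3,4,5] is range(3, 6)
  else if (List.range 4).any (fun i => ([3, 4, 5] : List Nat).any (fun j =>
      (pvCell (pvBoardA state) i j == pvCell (pvBoardA state) (i+1) (j-1)) && (pvCell (pvBoardA state) i j == pvCell (pvBoardA state) (i+2) (j-2))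
        && (pvCell (pvBoardA state) i j == pvCell (pvBoardA state) (i+3) (j-3)) && (pvCell (pvBoardA state) i j != "X"))) then 1
  -- diagonal up-left
  else if (List.range 4).any (fun i => (List.range 3).any (fun j =>
      (pvCell (pvBoardA state) i j == pvCell (pvBoardA state) (i+1) (j+1)) && (pvCell (pvBoardA state) i j == pvCell (pvBoardA state) (i+2) (j+2))
        && (pvCell (pvBoardA state) i j == pvCell (pvBoardA state) (i+3) (j+3)) && (pvCell (pvBoardA state) i j != "X"))) then 1
  else if validMovesA state == [] then -1
  else 0

-- ===== PORT B =====
-- the streak counter `_run4`: prev/cnt scan, True at the first cell closing a run of ≥ 4 non-'X'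
def pvRun4Go : Option String → Nat → List String → Bool
  | _, _, [] => false
  | prev, cnt, v :: rest =>
    let cnt' := if some v == prev then cnt + 1 else 1
    if 4 ≤ cnt' && v != "X" then true else pvRun4Go (some v) cnt' rest

def pvRun4 (cells : List String) : Bool := pvRun4Go none 0 cells

-- `(['X'] * (6 - len(c)) + list(c))[:6]`  ([:6] on a list = take 6, exact for this nonnegative slice)
def pvColB (c : List String) : List String :=
  (List.replicate (6 - c.length) "X" ++ c).take 6

-- `[frame[c][r] for c in range(7)]`; `.getD` is exact on Pre_, where every index used is in range
def pvRowB (board : List (List String)) (r : Nat) : List String :=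
  (List.range 7).map (fun c => ((board.take 7).getD c []).getD r "")

-- `[frame[c][s-c] for c in range(7) if 0 <= s-c < 6]` (Nat: 0 ≤ s-c is c ≤ s)
def pvDiagA (board : List (List String)) (s : Nat) : List String :=
  ((List.range 7).filter (fun c => decide (c ≤ s) && decide (s - c ≤ 5))).map
    (fun c => ((board.take 7).getD c []).getD (s - c) "")

-- `[frame[c][c+5-t] for c in range(7) if 0 <= c+5-t < 6]`
def pvDiagM (board : List (List String)) (t : Nat) : List String :=
  ((List.range 7).filter (fun c => decide (t ≤ c + 5) && decide (c + 5 - t ≤ 5))).map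
    (fun c => ((board.take 7).getD c []).getD (c + 5 - t) "")

def reachedGoalState_alt (state : List (List String)) : Int :=
  let board := state.map pvColB
  if board.any pvRun4 then 1
  else if (List.range 6).any (fun r => pvRun4 (pvRowB board r)) then 1
  else if (List.range 12).any (fun s => pvRun4 (pvDiagA board s)) then 1
  else if (List.range 12).any (fun t => pvRun4 (pvDiagM board t)) then 1
  else if state.all (fun c => decide (6 ≤ c.length)) then -1
  else 0

-- ===== PRECONDITION & SPEC =====
-- helper used only by Pre_: the padded column
def pvPadded (c : List String) : List String :=
  if c.length < 6 then List.replicate (6 - c.length) "X" ++ c else c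

-- Pre_ is where both programs return: a board of ≥ 7 columns whose first column has height ≤ 6, or a
-- board holding a vertical four-in-a-row in some padded column (A returns 1 there before any
-- out-of-range indexing, and so does B).  Excluded although A returns: (a) boards whose first column
-- is taller than the 6-row frame are not Connect-4 positions and no specification fixes which rows to
-- scan there (A scans len(col0) rows, B the 6 frame rows); (b) boards with fewer than 7 columns whose
-- only win is horizontal, where A happens to return 1 just before its own IndexError while B's
-- natural frame indexing raises.
def Pre_reachedGoalState (state : List (List String)) : Prop :=
  (7 ≤ state.length ∧ (state.getD 0 []).length ≤ 6)
  ∨ (∃ c ∈ state, ∃ i ∈ List.range 3,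
      (pvPadded c).getD i "" = (pvPadded c).getD (i+1) "" ∧
      (pvPadded c).getD i "" = (pvPadded c).getD (i+2) "" ∧
      (pvPadded c).getD i "" = (pvPadded c).getD (i+3) "" ∧
      (pvPadded c).getD i "" ≠ "X")
instance (state : List (List String)) : Decidable (Pre_reachedGoalState state) := by
  unfold Pre_reachedGoalState; infer_instance

def pvWitness_reachedGoalState : List (List String) :=
  [["O"], ["P", "O"], [], ["O", "P", "O", "P", "O", "P"], ["P"], [], ["O"]]

def Spec_reachedGoalState (state : List (List String)) (out : Int) : Prop := out = reachedGoalState_alt state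
instance (state : List (List String)) (out : Int) : Decidable (Spec_reachedGoalState state out) := by unfold Spec_reachedGoalState; infer_instance

-- ===== CLAIM (what is proved, stated in full; the proofs are below) =====
def Claim_equal_reachedGoalState : Prop := ∀ (state : List (List String)), Dom_reachedGoalState state → Pre_reachedGoalState state → Spec_reachedGoalState state (reachedGoalState state)

-- ===== LEMMAS AND PROOFS =====

-- ---- the streak scan finds a run of 4 iff some 4-cell window is equal and non-'X' ----
-- window recursion used only in the proofs
def pvWin4 : List String → Bool
  | a :: b :: c :: d :: t => ((a == b) && (a == c) && (a == d) && (a != "X")) || pvWin4 (b :: c :: d :: t)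
  | _ => false

lemma pvWin4_short (l : List String) (h : l.length ≤ 3) : pvWin4 l = false := by
  rcases l with _ | ⟨a, _ | ⟨b, _ | ⟨c, _ | ⟨d, t⟩⟩⟩⟩ <;> first
    | rfl
    | (simp at h; omega)

-- dropping a head whose 4-window fails does not change pvWin4
lemma pvWin4_cons_false (p : String) (l : List String)
    (h : (match l with
          | b :: c :: d :: _ => ((p == b) && (p == c) && (p == d) && (p != "X"))
          | _ => false) = false) :
    pvWin4 (p :: l) = pvWin4 l := by
  rcases l with _ | ⟨b, _ | ⟨c, _ | ⟨d, t⟩⟩⟩ <;> simp_all [pvWin4]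

lemma pvWin4_skip (p v : String) (hne : v ≠ p) (k : Nat) (hk : k ≤ 3) (rest : List String) :
    pvWin4 (List.replicate k p ++ v :: rest) = pvWin4 (v :: rest) := by
  have hpv : (p == v) = false := by simp [Ne.symm hne]
  interval_cases k
  · rfl
  · simp only [List.replicate, List.cons_append, List.nil_append]
    exact pvWin4_cons_false p (v :: rest) (by rcases rest with _ | ⟨x, _ | ⟨y, r⟩⟩ <;> simp [hpv])
  · simp only [List.replicate, List.cons_append, List.nil_append]
    rw [pvWin4_cons_false p (p :: v :: rest) (by rcases rest with _ | ⟨x, r⟩ <;> simp [hpv])]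
    exact pvWin4_cons_false p (v :: rest) (by rcases rest with _ | ⟨x, _ | ⟨y, r⟩⟩ <;> simp [hpv])
  · simp only [List.replicate, List.cons_append, List.nil_append]
    rw [pvWin4_cons_false p (p :: p :: v :: rest) (by simp [hpv])]
    rw [pvWin4_cons_false p (p :: v :: rest) (by rcases rest with _ | ⟨x, r⟩ <;> simp [hpv])]
    exact pvWin4_cons_false p (v :: rest) (by rcases rest with _ | ⟨x, _ | ⟨y, r⟩⟩ <;> simp [hpv])

lemma pvRun4Go_eq (l : List String) : ∀ (p : String) (c : Nat),
    pvRun4Go (some p) c l = pvWin4 (List.replicate (min c 3) p ++ l) := by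
  induction l with
  | nil =>
    intro p c
    show false = _
    exact (pvWin4_short _ (by simp)).symm
  | cons v rest ih =>
    intro p c
    by_cases hv : v = p
    · subst hv
      simp only [pvRun4Go, beq_self_eq_true, if_true]
      by_cases hc : 3 ≤ c
      · have hmin : min c 3 = 3 := by omega
        have hmin' : min (c + 1) 3 = 3 := by omega
        rw [hmin]
        by_cases hx : v = "X"
        · subst hx
          rw [if_neg (by simp), ih, hmin']
          simp [pvWin4, List.replicate]
        · rw [if_pos (by simp [hx]; omega)]
          simp [pvWin4, List.replicate, hx]
      · have hmin : min c 3 = c := by omega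
        have hmin' : min (c + 1) 3 = c + 1 := by omega
        rw [hmin, if_neg (by simp; omega), ih, hmin']
        congr 1
        rw [List.replicate_succ' (n := c)]
        simp
    · have hbeq : (some v == some p) = false := by simp [hv]
      simp only [pvRun4Go, hbeq, Bool.false_eq_true, if_false]
      rw [if_neg (by simp), ih v 1]
      show _ = pvWin4 (List.replicate (min c 3) p ++ v :: rest)
      rw [pvWin4_skip p v hv (min c 3) (by omega)]
      rfl

lemma pvRun4_eq_win4 (l : List String) : pvRun4 l = pvWin4 l := by
  cases l with
  | nil => rfl
  | cons v rest =>
    show pvRun4Go none 0 (v :: rest) = _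
    simp only [pvRun4Go]
    rw [if_neg (by simp), if_neg (by simp)]
    simpa using pvRun4Go_eq rest v 1

-- indexed characterisation of pvWin4
lemma pvWin4_any (l : List String) :
    pvWin4 l = (List.range (l.length - 3)).any (fun i =>
      (l.getD i "" == l.getD (i+1) "") && (l.getD i "" == l.getD (i+2) "")
        && (l.getD i "" == l.getD (i+3) "") && (l.getD i "" != "X")) := by
  induction l with
  | nil => rfl
  | cons a t ih =>
    rcases t with _ | ⟨b, _ | ⟨c, _ | ⟨d, u⟩⟩⟩
    · rfl
    · rfl
    · rfl
    · have hlen : (a :: b :: c :: d :: u).length - 3 = (u.length) + 1 := by simp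
      rw [hlen, List.range_succ_eq_map]
      simp only [List.any_cons, List.any_map]
      rw [pvWin4]
      have hlen2 : (b :: c :: d :: u).length - 3 = u.length := by simp
      rw [ih, hlen2]
      congr 1

-- ---- padding / board bridges ----
lemma pvPadA_eq (slot : List String) :
    pvPadA slot = List.replicate (6 - slot.length) "X" ++ slot := by
  unfold pvPadA
  generalize 6 - slot.length = k
  induction k with
  | zero => simp
  | succ k ih => simp [List.range_succ, List.foldl_append, ih, List.replicate_succ]

lemma pvPadA_eq_padded (slot : List String) : pvPadA slot = pvPadded slot := by
  rw [pvPadA_eq]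
  unfold pvPadded
  split
  · rfl
  · rename_i h
    have : 6 - slot.length = 0 := by omega
    simp [this]

lemma pvGetD_take {α : Type} (l : List α) (n i : Nat) (d : α) (h : i < n) :
    (l.take n).getD i d = l.getD i d := by
  simp [List.getD_eq_getElem?_getD, h]

lemma pvColB_eq (c : List String) : pvColB c = (pvPadA c).take 6 := by
  rw [pvColB, pvPadA_eq]

lemma pvPadA_len (c : List String) : (pvPadA c).length = max 6 c.length := by
  rw [pvPadA_eq]; simp; omega

lemma pvColB_len (c : List String) : (pvColB c).length = 6 := by
  rw [pvColB_eq]; simp [pvPadA_len]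

lemma pvColB_getD (c : List String) (r : Nat) (hr : r < 6) :
    (pvColB c).getD r "" = (pvPadA c).getD r "" := by
  rw [pvColB_eq]; exact pvGetD_take _ 6 r "" hr

lemma pvBoardA_getD (state : List (List String)) (c : Nat) (hc : c < state.length) :
    (pvBoardA state).getD c [] = pvPadA (state.getD c []) := by
  unfold pvBoardA
  rw [List.getD_eq_getElem _ _ (by simpa using hc), List.getElem_map, List.getD_eq_getElem _ _ hc]

lemma pvBoardB_getD (state : List (List String)) (c : Nat) (hc : c < state.length) :
    (state.map pvColB).getD c [] = pvColB (state.getD c []) := by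
  rw [List.getD_eq_getElem _ _ (by simpa using hc), List.getElem_map, List.getD_eq_getElem _ _ hc]

lemma pvCell_bridge (state : List (List String)) (c r : Nat)
    (hc : c < state.length) (hr : r < 6) :
    ((state.map pvColB).getD c []).getD r "" = pvCell (pvBoardA state) c r := by
  rw [pvBoardB_getD state c hc, pvColB_getD _ r hr, pvCell, pvBoardA_getD state c hc]

lemma pvPadded_len (c : List String) (h : c.length ≤ 6) : (pvPadded c).length = 6 := by
  unfold pvPadded
  split
  · simp
    omega
  · rename_i hlt
    omega

lemma pvLen0 (state : List (List String)) (h0 : 0 < state.length)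
    (hc : (state.getD 0 []).length ≤ 6) :
    ((pvBoardA state).getD 0 []).length = 6 := by
  rw [pvBoardA_getD state 0 h0, pvPadA_eq_padded]
  exact pvPadded_len _ hc

-- any/all congruence under membership
lemma pvAnyCongrMem {α : Type} {l : List α} {p q : α → Bool}
    (h : ∀ a ∈ l, p a = q a) : l.any p = l.any q := by
  induction l with
  | nil => rfl
  | cons a t ih => simp_all

-- ---- per-column vertical bridge ----
lemma pvRunCol (col : List String) :
    pvRun4 (pvColB col) = (List.range 3).any (fun i =>
      ((pvPadA col).getD i "" == (pvPadA col).getD (i+1) "") && ((pvPadA col).getD i "" == (pvPadA col).getD (i+2) "")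
        && ((pvPadA col).getD i "" == (pvPadA col).getD (i+3) "") && ((pvPadA col).getD i "" != "X")) := by
  rw [pvRun4_eq_win4, pvWin4_any, pvColB_len, show (6:Nat) - 3 = 3 from rfl]
  refine pvAnyCongrMem fun i hi => ?_
  have hi3 : i < 3 := by simpa using hi
  rw [pvColB_getD _ i (by omega), pvColB_getD _ (i+1) (by omega),
      pvColB_getD _ (i+2) (by omega), pvColB_getD _ (i+3) (by omega)]

-- ---- generic direction lemmas (both sides over one abstract cell function) ----
lemma pvHorizEquiv (cell : Nat → Nat → String) :
    ((List.range 4).any (fun j => (List.range 6).any (fun i =>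
      (cell j i == cell (j+1) i) && (cell j i == cell (j+2) i) && (cell j i == cell (j+3) i) && (cell j i != "X"))))
    = ((List.range 6).any (fun r => pvWin4 ((List.range 7).map (fun c => cell c r)))) := by
  simp [List.range_succ, pvWin4]
  ac_rfl

lemma pvDiagAEquiv (cell : Nat → Nat → String) :
    ((List.range 4).any (fun i => ([3, 4, 5] : List Nat).any (fun j =>
      (cell i j == cell (i+1) (j-1)) && (cell i j == cell (i+2) (j-2)) && (cell i j == cell (i+3) (j-3)) && (cell i j != "X"))))
    = ((List.range 12).any (fun s => pvWin4
        (((List.range 7).filter (fun c => decide (c ≤ s) && decide (s - c ≤ 5))).map (fun c => cell c (s - c))))) := by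
  simp [List.range_succ, pvWin4, List.filter]
  ac_rfl

lemma pvDiagMEquiv (cell : Nat → Nat → String) :
    ((List.range 4).any (fun i => (List.range 3).any (fun j =>
      (cell i j == cell (i+1) (j+1)) && (cell i j == cell (i+2) (j+2)) && (cell i j == cell (i+3) (j+3)) && (cell i j != "X"))))
    = ((List.range 12).any (fun t => pvWin4
        (((List.range 7).filter (fun c => decide (t ≤ c + 5) && decide (c + 5 - t ≤ 5))).map (fun c => cell c (c + 5 - t))))) := by
  simp [List.range_succ, pvWin4, List.filter]
  ac_rfl

-- ---- B's lines, rewritten to A's cell accessor (main case: ≥ 7 columns) ----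
lemma pvCellB_eq (state : List (List String)) (c r : Nat)
    (h7 : 7 ≤ state.length) (hc : c < 7) (hr : r < 6) :
    (((state.map pvColB).take 7).getD c []).getD r "" = pvCell (pvBoardA state) c r := by
  rw [pvGetD_take _ 7 c [] hc]
  exact pvCell_bridge state c r (by omega) hr

lemma pvRow_eq (state : List (List String)) (r : Nat) (h7 : 7 ≤ state.length) (hr : r < 6) :
    pvRowB (state.map pvColB) r = (List.range 7).map (fun c => pvCell (pvBoardA state) c r) := by
  unfold pvRowB
  apply List.map_congr_left
  intro c hc
  exact pvCellB_eq state c r h7 (by simpa using hc) hr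

lemma pvDiagA_eq (state : List (List String)) (s : Nat) (h7 : 7 ≤ state.length) :
    pvDiagA (state.map pvColB) s
      = ((List.range 7).filter (fun c => decide (c ≤ s) && decide (s - c ≤ 5))).map
          (fun c => pvCell (pvBoardA state) c (s - c)) := by
  unfold pvDiagA
  apply List.map_congr_left
  intro c hc
  have hmem := List.mem_filter.mp hc
  have hc7 : c < 7 := by simpa using hmem.1
  have hle : s - c ≤ 5 := by
    have := hmem.2
    simp only [Bool.and_eq_true, decide_eq_true_eq] at this
    exact this.2
  exact pvCellB_eq state c (s - c) h7 hc7 (by omega)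

lemma pvDiagM_eq (state : List (List String)) (t : Nat) (h7 : 7 ≤ state.length) :
    pvDiagM (state.map pvColB) t
      = ((List.range 7).filter (fun c => decide (t ≤ c + 5) && decide (c + 5 - t ≤ 5))).map
          (fun c => pvCell (pvBoardA state) c (c + 5 - t)) := by
  unfold pvDiagM
  apply List.map_congr_left
  intro c hc
  have hmem := List.mem_filter.mp hc
  have hc7 : c < 7 := by simpa using hmem.1
  have hle : c + 5 - t ≤ 5 := by
    have := hmem.2
    simp only [Bool.and_eq_true, decide_eq_true_eq] at this
    exact this.2
  exact pvCellB_eq state c (c + 5 - t) h7 hc7 (by omega)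

-- ---- the tie test ----
lemma pvAll_range {α : Type} (l : List α) (d : α) (p : α → Bool) :
    l.all p = (List.range l.length).all (fun i => p (l.getD i d)) := by
  induction l with
  | nil => simp
  | cons a t ih =>
    simp [List.range_succ_eq_map, List.all_map, ih, Function.comp_def]

lemma pvTie_eq (state : List (List String)) :
    (validMovesA state == []) = state.all (fun c => decide (6 ≤ c.length)) := by
  unfold validMovesA
  rw [PySem.List.foldl_append_ite (p := fun i => (state.getD i []).length < 6) (f := fun i => (i : Int))]
  rw [List.nil_append, pvAll_range state [] (fun c => decide (6 ≤ c.length)),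
      Bool.eq_iff_iff, beq_iff_eq, List.map_eq_nil_iff, List.filter_eq_nil_iff,
      List.all_eq_true]
  constructor
  · intro h i hi
    have := h i hi
    simp at this ⊢
    omega
  · intro h i hi
    have := h i hi
    simp at this ⊢
    omega

-- ---- the main equivalence (first disjunct of Pre_) ----
lemma pvMain (state : List (List String)) (h7 : 7 ≤ state.length)
    (hc : (state.getD 0 []).length ≤ 6) :
    reachedGoalState state = reachedGoalState_alt state := by
  have hV : ((pvBoardA state).any (fun slot => (List.range 3).any (fun i =>
      (slot.getD i "" == slot.getD (i+1) "") && (slot.getD i "" == slot.getD (i+2) "")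
        && (slot.getD i "" == slot.getD (i+3) "") && (slot.getD i "" != "X"))))
      = (state.map pvColB).any pvRun4 := by
    unfold pvBoardA
    rw [List.any_map, List.any_map]
    exact pvAnyCongrMem fun col _ => (pvRunCol col).symm
  have hH : ((List.range 4).any (fun j => (List.range ((pvBoardA state).getD 0 []).length).any (fun i =>
      (pvCell (pvBoardA state) j i == pvCell (pvBoardA state) (j+1) i) && (pvCell (pvBoardA state) j i == pvCell (pvBoardA state) (j+2) i)
        && (pvCell (pvBoardA state) j i == pvCell (pvBoardA state) (j+3) i) && (pvCell (pvBoardA state) j i != "X"))))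
      = (List.range 6).any (fun r => pvRun4 (pvRowB (state.map pvColB) r)) := by
    rw [pvLen0 state (by omega) hc]
    rw [pvHorizEquiv (fun c r => pvCell (pvBoardA state) c r)]
    refine pvAnyCongrMem fun r hr => ?_
    have hr6 : r < 6 := by simpa using hr
    rw [pvRun4_eq_win4, pvRow_eq state r h7 hr6]
  have hDA : ((List.range 4).any (fun i => ([3, 4, 5] : List Nat).any (fun j =>
      (pvCell (pvBoardA state) i j == pvCell (pvBoardA state) (i+1) (j-1)) && (pvCell (pvBoardA state) i j == pvCell (pvBoardA state) (i+2) (j-2))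
        && (pvCell (pvBoardA state) i j == pvCell (pvBoardA state) (i+3) (j-3)) && (pvCell (pvBoardA state) i j != "X"))))
      = (List.range 12).any (fun s => pvRun4 (pvDiagA (state.map pvColB) s)) := by
    rw [pvDiagAEquiv (fun c r => pvCell (pvBoardA state) c r)]
    refine pvAnyCongrMem fun s _ => ?_
    rw [pvRun4_eq_win4, pvDiagA_eq state s h7]
  have hDM : ((List.range 4).any (fun i => (List.range 3).any (fun j =>
      (pvCell (pvBoardA state) i j == pvCell (pvBoardA state) (i+1) (j+1)) && (pvCell (pvBoardA state) i j == pvCell (pvBoardA state) (i+2) (j+2))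
        && (pvCell (pvBoardA state) i j == pvCell (pvBoardA state) (i+3) (j+3)) && (pvCell (pvBoardA state) i j != "X"))))
      = (List.range 12).any (fun t => pvRun4 (pvDiagM (state.map pvColB) t)) := by
    rw [pvDiagMEquiv (fun c r => pvCell (pvBoardA state) c r)]
    refine pvAnyCongrMem fun t _ => ?_
    rw [pvRun4_eq_win4, pvDiagM_eq state t h7]
  unfold reachedGoalState reachedGoalState_alt
  simp only []
  rw [hV, hH, hDA, hDM, pvTie_eq]

-- ---- early-win cases of Pre_ (A returns 1 before its out-of-range indexing) ----
lemma pvVertA (state : List (List String))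
    (h : ∃ c ∈ state, ∃ i ∈ List.range 3,
      (pvPadded c).getD i "" = (pvPadded c).getD (i+1) "" ∧
      (pvPadded c).getD i "" = (pvPadded c).getD (i+2) "" ∧
      (pvPadded c).getD i "" = (pvPadded c).getD (i+3) "" ∧
      (pvPadded c).getD i "" ≠ "X") :
    reachedGoalState state = 1 := by
  obtain ⟨c, hc, i, hi, h1, h2, h3, h4⟩ := h
  unfold reachedGoalState
  rw [if_pos]
  rw [List.any_eq_true]
  refine ⟨pvPadA c, List.mem_map_of_mem hc, ?_⟩
  rw [List.any_eq_true]
  refine ⟨i, hi, ?_⟩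
  rw [pvPadA_eq_padded, ← h1, ← h2, ← h3]
  simpa [List.getD] using h4

lemma pvVertB (state : List (List String))
    (h : ∃ c ∈ state, ∃ i ∈ List.range 3,
      (pvPadded c).getD i "" = (pvPadded c).getD (i+1) "" ∧
      (pvPadded c).getD i "" = (pvPadded c).getD (i+2) "" ∧
      (pvPadded c).getD i "" = (pvPadded c).getD (i+3) "" ∧
      (pvPadded c).getD i "" ≠ "X") :
    reachedGoalState_alt state = 1 := by
  obtain ⟨c, hc, i, hi, h1, h2, h3, h4⟩ := h
  unfold reachedGoalState_alt
  simp only []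
  rw [if_pos]
  rw [List.any_eq_true]
  refine ⟨pvColB c, List.mem_map_of_mem hc, ?_⟩
  rw [pvRunCol c, List.any_eq_true]
  refine ⟨i, hi, ?_⟩
  rw [pvPadA_eq_padded, ← h1, ← h2, ← h3]
  simpa [List.getD] using h4

-- ===== VERDICT (by name: the statement is the Claim_ definition above) =====
theorem reachedGoalState_spec : Claim_equal_reachedGoalState := by
  intro state _ hPre
  unfold Spec_reachedGoalState
  rcases hPre with ⟨h7, h0⟩ | hvert
  · exact pvMain state h7 h0
  · rw [pvVertA state hvert, pvVertB state hvert]
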